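-- pv_equiv track=rewrite | github.com/EshwaryForReasons/particleGPT | data_cleaner_5a.py | calculate_num_removable_particles
-- ===== SOURCE A (Python) =====
-- def find_events_lost_due_to_particle_removal(rows_occuring, n_least_frequent):
--     sorted_items = sorted(rows_occuring.items(), key=lambda x: len(x[1]), reverse=False)
--     sorted_items = sorted_items[:n_least_frequent]
--
--     events_lost = set()
--     for particle, events in sorted_items:
--         events_lost.update(events)
--     return events_lost
--
-- def calculate_num_removable_particles(rows_occuring, n_allowed_event_removals):
--     n_most_removable_particles = 0
--     for i in range(0, len(rows_occuring)):
--         removed_events = find_events_lost_due_to_particle_removal(rows_occuring, i)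
--         n_removed_events = len(removed_events)
--         if n_removed_events <= n_allowed_event_removals:
--             n_most_removable_particles = i
--     return n_most_removable_particles
-- ===== SOURCE B (Python) =====
-- def calculate_num_removable_particles(rows_occuring, n_allowed_event_removals):
--     # Sort rows by frequency once, then accumulate the union of lost events in a single pass.
--     by_freq = sorted(rows_occuring.items(), key=lambda kv: len(kv[1]))
--     seen = set()
--     ans = 0
--     for i, (particle, events) in enumerate(by_freq):
--         if len(seen) <= n_allowed_event_removals:
--             ans = i
--         seen.update(events)
--     return ans
-- ===== Notes on version B (the rewrite author's own statement) =====
-- stated objective: faster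
-- what changed: A re-sorts the dict and recomputes the entire prefix union of lost events from scratch for every candidate count i; B sorts the rows by frequency once and does a single pass that grows the union incrementally, recording the last count whose accumulated loss fits the budget.
import Mathlib
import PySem

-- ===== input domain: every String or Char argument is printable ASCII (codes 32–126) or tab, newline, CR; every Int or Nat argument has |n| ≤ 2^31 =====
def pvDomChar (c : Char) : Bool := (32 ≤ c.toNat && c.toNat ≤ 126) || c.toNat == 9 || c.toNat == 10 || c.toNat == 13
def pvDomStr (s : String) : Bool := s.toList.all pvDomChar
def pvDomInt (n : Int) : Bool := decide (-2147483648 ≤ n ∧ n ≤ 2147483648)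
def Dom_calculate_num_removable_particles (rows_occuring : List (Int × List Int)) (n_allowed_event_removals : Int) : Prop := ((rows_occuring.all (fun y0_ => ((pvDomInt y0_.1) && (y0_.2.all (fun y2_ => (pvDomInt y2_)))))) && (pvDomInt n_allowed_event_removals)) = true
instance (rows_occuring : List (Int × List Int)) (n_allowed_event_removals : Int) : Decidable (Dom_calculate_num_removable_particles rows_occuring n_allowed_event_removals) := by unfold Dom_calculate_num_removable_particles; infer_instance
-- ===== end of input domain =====

-- B replaces A's quadratic loop (which re-sorts the dict and recomputes the whole prefix union
-- of lost events for every candidate count i) by one sort followed by a single incremental pass.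

-- ===== PORT A =====
-- the assoc list stands for a Python dict: go through PySem.Dict (dedup, insertion order)
def find_events_lost_due_to_particle_removal (rows_occuring : List (Int × List Int)) (n_least_frequent : Int) : PySem.Set Int :=
  let sorted_items := PySem.List.sorted (PySem.Dict.ofList rows_occuring).items (fun x => (x.2.length : Int)) false
  let sorted_items := PySem.List.slice sorted_items none (some n_least_frequent)
  sorted_items.foldl (fun events_lost p => PySem.Set.update events_lost p.2) PySem.Set.empty

def calculate_num_removable_particles (rows_occuring : List (Int × List Int)) (n_allowed_event_removals : Int) : Int :=
  (PySem.List.pyRange 0 ((PySem.Dict.ofList rows_occuring).items.length : Int)).foldl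
    (fun n_most_removable_particles i =>
      let removed_events := find_events_lost_due_to_particle_removal rows_occuring i
      let n_removed_events := PySem.Set.len removed_events
      if n_removed_events ≤ n_allowed_event_removals then i else n_most_removable_particles)
    0

-- ===== PORT B =====
def calculate_num_removable_particles_alt (rows_occuring : List (Int × List Int)) (n_allowed_event_removals : Int) : Int :=
  let by_freq := PySem.List.sorted (PySem.Dict.ofList rows_occuring).items (fun kv => (kv.2.length : Int)) false
  let st := (PySem.List.enumerate by_freq 0).foldl
    (fun (st : PySem.Set Int × Int) p =>
      (PySem.Set.update st.1 p.2.2,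
       if PySem.Set.len st.1 ≤ n_allowed_event_removals then p.1 else st.2))
    (PySem.Set.empty, 0)
  st.2

-- ===== PRECONDITION & SPEC =====
def Spec_calculate_num_removable_particles (rows_occuring : List (Int × List Int)) (n_allowed_event_removals : Int) (out : Int) : Prop := out = calculate_num_removable_particles_alt rows_occuring n_allowed_event_removals
instance (rows_occuring : List (Int × List Int)) (n_allowed_event_removals : Int) (out : Int) : Decidable (Spec_calculate_num_removable_particles rows_occuring n_allowed_event_removals out) := by unfold Spec_calculate_num_removable_particles; infer_instance

-- ===== CLAIM (what is proved, stated in full; the proofs are below) =====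
def Claim_equal_calculate_num_removable_particles : Prop := ∀ (rows_occuring : List (Int × List Int)) (n_allowed_event_removals : Int), Dom_calculate_num_removable_particles rows_occuring n_allowed_event_removals → Spec_calculate_num_removable_particles rows_occuring n_allowed_event_removals (calculate_num_removable_particles rows_occuring n_allowed_event_removals)

-- ===== LEMMAS AND PROOFS =====

-- prefix union of the event lists of L (both programs build it, A repeatedly, B once)
def pvUnionOf (L : List (Int × List Int)) : PySem.Set Int :=
  L.foldl (fun events_lost p => PySem.Set.update events_lost p.2) PySem.Set.empty

-- A's outer loop, expressed over an arbitrary (already sorted) item list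
def pvALoop (L : List (Int × List Int)) (n : Int) : Int :=
  (PySem.List.pyRange 0 (L.length : Int)).foldl
    (fun acc i =>
      if PySem.Set.len (pvUnionOf (PySem.List.slice L none (some i))) ≤ n then i else acc)
    0

lemma pv_loop_eq (n : Int) (L : List (Int × List Int)) :
    (PySem.List.enumerate L 0).foldl
      (fun (st : PySem.Set Int × Int) p =>
        (PySem.Set.update st.1 p.2.2,
         if PySem.Set.len st.1 ≤ n then p.1 else st.2))
      (PySem.Set.empty, 0)
    = (pvUnionOf L, pvALoop L n) := by
  induction L using List.reverseRecOn with
  | nil => simp [pvUnionOf, pvALoop, PySem.List.enumerate, PySem.List.pyRange]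
  | append_singleton L' x ih =>
    rw [PySem.List.enumerate_append, List.foldl_append, ih]
    have hlen : ((L' ++ [x]).length : Int) = (L'.length : Int) + 1 := by
      simp
    have hrange : PySem.List.pyRange 0 ((L' ++ [x]).length : Int)
        = PySem.List.pyRange 0 (L'.length : Int) ++ [(L'.length : Int)] := by
      rw [hlen, PySem.List.pyRange_one_succ_right (by positivity)]
    have hU : pvUnionOf (L' ++ [x]) = PySem.Set.update (pvUnionOf L') x.2 := by
      simp [pvUnionOf]
    have hslice_last : PySem.List.slice (L' ++ [x]) none (some (L'.length : Int)) = L' := by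
      rw [PySem.List.slice_to_natCast]
      simp
    have hcongr : (PySem.List.pyRange 0 (L'.length : Int)).foldl
        (fun acc i =>
          if PySem.Set.len (pvUnionOf (PySem.List.slice (L' ++ [x]) none (some i))) ≤ n then i else acc) 0
        = pvALoop L' n := by
      unfold pvALoop
      apply PySem.List.foldl_congr_mem
      intro acc i hi
      rw [PySem.List.mem_pyRange_one] at hi
      obtain ⟨j, rfl⟩ : ∃ j : Nat, i = (j : Int) := ⟨i.toNat, (Int.toNat_of_nonneg hi.1).symm⟩
      have hj : j ≤ L'.length := by exact_mod_cast le_of_lt hi.2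
      rw [PySem.List.slice_to_natCast, PySem.List.slice_to_natCast,
        List.take_append_of_le_length hj]
    simp only [PySem.List.enumerate, List.foldl_cons, List.foldl_nil]
    rw [hU]
    refine Prod.ext rfl ?_
    simp only [pvALoop, hrange, List.foldl_append, List.foldl_cons, List.foldl_nil, hcongr,
      hslice_last]
    simp

-- ===== VERDICT (by name: the statement is the Claim_ definition above) =====
theorem calculate_num_removable_particles_spec : Claim_equal_calculate_num_removable_particles := by
  intro rows n _
  unfold Spec_calculate_num_removable_particles
  simp only [calculate_num_removable_particles, calculate_num_removable_particles_alt]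
  rw [pv_loop_eq]
  simp only [pvALoop, find_events_lost_due_to_particle_removal, PySem.List.length_sorted,
    pvUnionOf]
  rfl
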